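-- pv_equiv track=rewrite | github.com/JWbase/algorithmStudy | 프로그래머스/lv0/120956. 옹알이 （1）/옹알이 （1）.py | solution
-- ===== SOURCE A (Python) =====
-- from itertools import permutations
--
-- def solution(babbling):
--     answer = 0
--     sound = ["aya", "ye", "woo","ma"]
--     combi = []
--     for i in range(1, len(sound)+1):
--         for j in permutations(sound, i):
--             combi.append("".join(j))
--
--     for i in babbling:
--         if i in combi:
--             answer += 1
--
--
--     return answer
-- ===== SOURCE B (Python) =====
-- def solution(babbling):
--     sounds = ("aya", "ye", "woo", "ma")
--
--     def ok(word):
--         used = []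
--         while word:
--             for s in sounds:
--                 if s not in used and word.startswith(s):
--                     used.append(s)
--                     word = word[len(s):]
--                     break
--             else:
--                 return False
--         return bool(used)
--
--     return sum(ok(w) for w in babbling)
-- ===== Notes on version B (the rewrite author's own statement) =====
-- stated objective: alternative
-- what changed: Replaces the precomputed table of all 64 permutation-concatenations (and a linear membership scan per word) by a greedy front-matching parser that consumes each word sound by sound, tracking used sounds.
import Mathlib
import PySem

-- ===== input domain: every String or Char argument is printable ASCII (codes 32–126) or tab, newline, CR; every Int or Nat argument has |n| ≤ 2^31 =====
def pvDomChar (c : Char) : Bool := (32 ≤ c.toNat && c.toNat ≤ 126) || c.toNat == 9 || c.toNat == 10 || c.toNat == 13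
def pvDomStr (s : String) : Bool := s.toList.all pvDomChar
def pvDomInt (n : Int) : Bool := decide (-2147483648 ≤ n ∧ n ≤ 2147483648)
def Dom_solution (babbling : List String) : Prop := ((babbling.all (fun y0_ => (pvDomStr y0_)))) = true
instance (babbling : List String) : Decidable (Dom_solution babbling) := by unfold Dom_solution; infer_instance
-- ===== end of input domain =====

-- B replaces A's precomputed 64-entry permutation table (and per-word linear table scan) by a
-- greedy front-matching parser per word; the return values agree on all inputs.

-- ===== PORT A =====
def solution (babbling : List String) : Int :=
  let sound : List String := ["aya", "ye", "woo", "ma"]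
  let combi : List String :=
    (PySem.List.pyRange 1 ((sound.length : Int) + 1) 1).foldl
      (fun acc i =>
        acc ++ (PySem.List.permutations sound i.toNat).map (fun j => PySem.Str.join "" j)) []
  babbling.foldl (fun answer i => if combi.contains i then answer + 1 else answer) 0

-- ===== PORT B =====
-- the four sounds as char lists (B works on the front of the word)
def soundsC : List (List Char) := [['a','y','a'], ['y','e'], ['w','o','o'], ['m','a']]

-- greedy parser: consume one unused sound from the front of the word, else fail; accept a
-- fully-consumed word iff at least one sound was used
def parse (cs : List Char) (used : List (List Char)) : Bool :=
  if h : cs = [] then !used.isEmpty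
  else
    match hf : soundsC.find? (fun s => !used.contains s && s.isPrefixOf cs) with
    | some s => parse (cs.drop s.length) (used ++ [s])
    | none => false
termination_by cs.length
decreasing_by
  have hm := List.mem_of_find?_eq_some hf
  have hs : 0 < s.length := by fin_cases hm <;> simp
  have hc : 0 < cs.length := List.length_pos_of_ne_nil h
  simp only [List.length_drop]
  omega

def solution_alt (babbling : List String) : Int :=
  ((babbling.countP (fun w => parse w.toList [])) : Int)

-- ===== PRECONDITION & SPEC =====
def Spec_solution (babbling : List String) (out : Int) : Prop := out = solution_alt babbling
instance (babbling : List String) (out : Int) : Decidable (Spec_solution babbling out) := by unfold Spec_solution; infer_instance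

-- ===== CLAIM (what is proved, stated in full; the proofs are below) =====
def Claim_equal_solution : Prop := ∀ (babbling : List String), Dom_solution babbling → Spec_solution babbling (solution babbling)

-- ===== LEMMAS AND PROOFS =====

-- A's sound list and its combi table, named for the proofs
def soundA : List String := ["aya", "ye", "woo", "ma"]

def combiA : List String :=
  (PySem.List.pyRange 1 ((soundA.length : Int) + 1) 1).foldl
    (fun acc i =>
      acc ++ (PySem.List.permutations soundA i.toNat).map (fun j => PySem.Str.join "" j)) []

-- the acceptance predicate both programs compute: the word is a concatenation of
-- pairwise distinct sounds, at least one
def IsBabble (w : String) : Prop :=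
  ∃ ss : List (List Char), (∀ s ∈ ss, s ∈ soundsC) ∧ ss.Nodup ∧ w.toList = ss.flatten ∧ ss ≠ []

theorem sound_ne_nil {s : List Char} (h : s ∈ soundsC) : s ≠ [] := by fin_cases h <;> simp

-- the four sounds start with four distinct letters, so at most one matches at a position
theorem prefix_unique {cs s1 s2 : List Char} (h1 : s1 ∈ soundsC) (h2 : s2 ∈ soundsC)
    (p1 : s1 <+: cs) (p2 : s2 <+: cs) : s1 = s2 := by
  fin_cases h1 <;> fin_cases h2 <;> try rfl
  all_goals {
    obtain ⟨t, rfl⟩ := p1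
    simp [List.cons_prefix_cons] at p2 }

-- characterisation of B's parser
theorem parse_iff (cs : List Char) (used : List (List Char)) :
    parse cs used = true ↔
      ∃ ss : List (List Char), (∀ s ∈ ss, s ∈ soundsC ∧ s ∉ used) ∧ ss.Nodup ∧
        cs = ss.flatten ∧ (used = [] → ss ≠ []) := by
  induction cs, used using parse.induct with
  | case1 used =>
    rw [parse]
    constructor
    · intro h
      refine ⟨[], by simp, by simp, rfl, fun hu => ?_⟩
      subst hu; simp at h
    · rintro ⟨ss, hmem, -, hfl, hne⟩
      have hss : ss = [] := by
        cases ss with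
        | nil => rfl
        | cons a t =>
          exfalso
          have := sound_ne_nil (hmem a List.mem_cons_self).1
          cases a with
          | nil => exact this rfl
          | cons c ct => simp at hfl
      subst hss
      have : used ≠ [] := fun h => (hne h) rfl
      simp [this]
  | case2 cs used h s hf ih =>
    rw [parse]
    rw [dif_neg h]
    rw [hf]
    show parse (cs.drop s.length) (used ++ [s]) = true ↔ _
    have hsmem := List.mem_of_find?_eq_some hf
    have hpred := List.find?_some hf
    simp only [Bool.and_eq_true, Bool.not_eq_true', List.contains_eq_mem, decide_eq_false_iff_not,
      List.isPrefixOf_iff_prefix] at hpred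
    obtain ⟨hsused, hspre⟩ := hpred
    obtain ⟨t, rfl⟩ := hspre
    rw [List.drop_left] at ih
    rw [List.drop_left, ih]
    constructor
    · rintro ⟨ss, hmem, hnd, hfl, -⟩
      refine ⟨s :: ss, ?_, ?_, by simp [hfl], by simp⟩
      · intro x hx
        rcases List.mem_cons.1 hx with rfl | hx
        · exact ⟨hsmem, hsused⟩
        · have := hmem x hx
          exact ⟨this.1, fun hm => this.2 (List.mem_append_left _ hm)⟩
      · refine List.nodup_cons.2 ⟨fun hsin => ?_, hnd⟩
        exact (hmem s hsin).2 (by simp)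
    · rintro ⟨ss, hmem, hnd, hfl, -⟩
      cases ss with
      | nil => simp at hfl; exact absurd hfl.1 (sound_ne_nil hsmem)
      | cons a ssT =>
        have ha := hmem a List.mem_cons_self
        have hapre : a <+: s ++ t := ⟨ssT.flatten, by rw [hfl]; simp⟩
        have : a = s := prefix_unique ha.1 hsmem hapre ⟨t, rfl⟩
        subst this
        refine ⟨ssT, ?_, (List.nodup_cons.1 hnd).2, ?_, by simp⟩
        · intro x hx
          have hxm := hmem x (List.mem_cons_of_mem _ hx)
          refine ⟨hxm.1, ?_⟩
          simp only [List.mem_append, List.mem_singleton]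
          rintro (hin | rfl)
          · exact hxm.2 hin
          · exact (List.nodup_cons.1 hnd).1 hx
        · exact List.append_cancel_left (hfl ▸ rfl : a ++ t = a ++ ssT.flatten)
  | case3 cs used h hf =>
    rw [parse, dif_neg h, hf]
    simp only [Bool.false_eq_true, false_iff]
    rintro ⟨ss, hmem, -, hfl, -⟩
    cases ss with
    | nil => exact h (by simp [hfl])
    | cons a t =>
      have ha := hmem a List.mem_cons_self
      have : soundsC.find? (fun s => !used.contains s && s.isPrefixOf cs) ≠ none := by
        rw [Ne, List.find?_eq_none]
        intro hall
        have := hall a ha.1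
        simp [List.contains_eq_mem, ha.2, List.isPrefixOf_iff_prefix] at this
        exact this ⟨t.flatten, by rw [hfl]; simp⟩
      exact this hf

-- characterisation of Python's permutations(xs, r) for duplicate-free xs
theorem mem_permsA {α : Type} [DecidableEq α] (r : ℕ) (xs j : List α) (hnd : xs.Nodup) :
    j ∈ PySem.List.permutations xs r ↔ j.length = r ∧ j.Nodup ∧ ∀ x ∈ j, x ∈ xs := by
  induction r generalizing xs j with
  | zero =>
    have h0 : PySem.List.permutations xs 0 = [[]] := rfl
    rw [h0]
    constructor
    · rintro h; simp at h; subst h; simp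
    · rintro ⟨hl, -, -⟩; simp [List.length_eq_zero_iff] at hl; simp [hl]
  | succ r ih =>
    rw [PySem.List.permutations_succ]
    simp only [List.mem_flatMap, List.mem_range]
    constructor
    · rintro ⟨i, hi, hj⟩
      rw [List.getElem?_eq_getElem hi] at hj
      simp only [List.mem_map] at hj
      obtain ⟨p, hp, rfl⟩ := hj
      rw [← List.Nodup.erase_getElem hnd i hi] at hp
      rw [ih _ _ (hnd.erase _)] at hp
      obtain ⟨hl, hpnd, hmem⟩ := hp
      refine ⟨by simp [hl], ?_, ?_⟩
      · refine List.nodup_cons.2 ⟨fun hx => ?_, hpnd⟩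
        exact ((hnd.mem_erase_iff.1 (hmem _ hx)).1) rfl
      · intro x hx
        rcases List.mem_cons.1 hx with rfl | hx
        · exact List.getElem_mem hi
        · exact (hnd.mem_erase_iff.1 (hmem _ hx)).2
    · rintro ⟨hl, hjnd, hmem⟩
      cases j with
      | nil => simp at hl
      | cons x p =>
        obtain ⟨i, hi, rfl⟩ := List.mem_iff_getElem.1 (hmem _ (List.mem_cons_self))
        refine ⟨i, hi, ?_⟩
        rw [List.getElem?_eq_getElem hi]
        simp only [List.mem_map]
        refine ⟨p, ?_, rfl⟩
        rw [← List.Nodup.erase_getElem hnd i hi, ih _ _ (hnd.erase _)]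
        obtain ⟨hxp, hpnd⟩ := List.nodup_cons.1 hjnd
        refine ⟨by simpa using hl, hpnd, fun y hy => ?_⟩
        exact hnd.mem_erase_iff.2 ⟨fun h => hxp (h ▸ hy), hmem _ (List.mem_cons_of_mem _ hy)⟩

theorem join_nil_eq_flatten (l : List (List Char)) : PySem.Chars.join [] l = l.flatten := by
  induction l with
  | nil => rfl
  | cons a t ih =>
    cases t with
    | nil => simp [PySem.Chars.join, List.intercalate]
    | cons b t2 => rw [PySem.Chars.join_cons_cons]; simp_all

theorem toList_join0 (j : List String) :
    (PySem.Str.join "" j).toList = (j.map String.toList).flatten := by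
  simp [PySem.Str.join, join_nil_eq_flatten]

theorem toList_injective : Function.Injective String.toList := fun a b h => by
  have := congrArg String.ofList h
  simpa using this

theorem mem_combiA (w : String) :
    w ∈ combiA ↔ ∃ j : List String, j.Nodup ∧ (∀ x ∈ j, x ∈ soundA) ∧ j ≠ [] ∧
      w = PySem.Str.join "" j := by
  have hnd : soundA.Nodup := by decide
  have hr : PySem.List.pyRange 1 ((soundA.length : Int) + 1) 1 = [1, 2, 3, 4] := by decide
  have hc : combiA
      = ((([] ++ (PySem.List.permutations soundA 1).map (fun j => PySem.Str.join "" j))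
          ++ (PySem.List.permutations soundA 2).map (fun j => PySem.Str.join "" j))
          ++ (PySem.List.permutations soundA 3).map (fun j => PySem.Str.join "" j))
          ++ (PySem.List.permutations soundA 4).map (fun j => PySem.Str.join "" j) := by
    rw [combiA, hr]; rfl
  rw [hc]
  simp only [List.mem_append, List.mem_map, List.nil_append]
  constructor
  · rintro (((⟨j, hj, rfl⟩ | ⟨j, hj, rfl⟩) | ⟨j, hj, rfl⟩) | ⟨j, hj, rfl⟩) <;>
    · rw [mem_permsA _ _ _ hnd] at hj
      exact ⟨j, hj.2.1, hj.2.2, by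
        intro hnil; rw [hnil] at hj; simp at hj, rfl⟩
  · rintro ⟨j, hjnd, hjmem, hjne, rfl⟩
    have hsub : j.toFinset ⊆ soundA.toFinset := by
      intro x hx
      rw [List.mem_toFinset] at hx ⊢
      exact hjmem x hx
    have hlen4 : j.length ≤ 4 := by
      have := Finset.card_le_card hsub
      rw [List.toFinset_card_of_nodup hjnd] at this
      simpa using this
    have hlen1 : 1 ≤ j.length := List.length_pos_of_ne_nil hjne
    have h14 : j.length = 1 ∨ j.length = 2 ∨ j.length = 3 ∨ j.length = 4 := by omega
    rcases h14 with hl | hl | hl | hl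
    · exact Or.inl (Or.inl (Or.inl ⟨j, (mem_permsA 1 soundA j hnd).2 ⟨hl, hjnd, hjmem⟩, rfl⟩))
    · exact Or.inl (Or.inl (Or.inr ⟨j, (mem_permsA 2 soundA j hnd).2 ⟨hl, hjnd, hjmem⟩, rfl⟩))
    · exact Or.inl (Or.inr ⟨j, (mem_permsA 3 soundA j hnd).2 ⟨hl, hjnd, hjmem⟩, rfl⟩)
    · exact Or.inr ⟨j, (mem_permsA 4 soundA j hnd).2 ⟨hl, hjnd, hjmem⟩, rfl⟩

theorem ofList_injective : Function.Injective String.ofList := fun a b h => by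
  have := congrArg String.toList h
  simpa using this

theorem mem_soundA_ofList {s : List Char} (h : s ∈ soundsC) : String.ofList s ∈ soundA := by
  fin_cases h <;> decide

theorem soundsC_eq_map : soundsC = soundA.map String.toList := rfl

theorem combiA_iff_isBabble (w : String) : w ∈ combiA ↔ IsBabble w := by
  rw [mem_combiA]
  constructor
  · rintro ⟨j, hnd, hmem, hne, rfl⟩
    refine ⟨j.map String.toList, ?_, hnd.map toList_injective, toList_join0 j, by simp [hne]⟩
    · intro x hx
      rw [List.mem_map] at hx
      obtain ⟨y, hy, rfl⟩ := hx
      rw [soundsC_eq_map, List.mem_map]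
      exact ⟨y, hmem y hy, rfl⟩
  · rintro ⟨ss, hmem, hnd, hfl, hne⟩
    refine ⟨ss.map String.ofList, hnd.map ofList_injective, ?_, by simp [hne], ?_⟩
    · intro x hx
      rw [List.mem_map] at hx
      obtain ⟨y, hy, rfl⟩ := hx
      exact mem_soundA_ofList (hmem y hy)
    · apply toList_injective
      rw [toList_join0, hfl, List.map_map]
      have hco : (String.toList ∘ String.ofList) = id := funext (fun c => by simp)
      rw [hco, List.map_id]
theorem pointwise (w : String) : combiA.contains w = parse w.toList [] := by
  rw [Bool.eq_iff_iff, List.contains_iff_mem, combiA_iff_isBabble, parse_iff]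
  constructor
  · rintro ⟨ss, a, b, c, d⟩
    exact ⟨ss, fun s hs => ⟨a s hs, by simp⟩, b, c, fun _ => d⟩
  · rintro ⟨ss, a, b, c, d⟩
    exact ⟨ss, fun s hs => (a s hs).1, b, c, d rfl⟩

-- ===== VERDICT (by name: the statement is the Claim_ definition above) =====
theorem solution_spec : Claim_equal_solution := by
  intro babbling _
  unfold Spec_solution solution_alt
  have hA : solution babbling
      = babbling.foldl (fun answer i => if combiA.contains i then answer + 1 else answer) 0 := rfl
  rw [hA, PySem.List.foldl_if_add_one]
  rw [List.countP_congr (fun w _ => by rw [pointwise w])]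
  simp
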